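-- pv_equiv track=rewrite | github.com/Woobs8/advent_of_code | 2021/04/part2.py | create_boards
-- ===== SOURCE A (Python) =====
-- def create_boards(lines: list) -> list:
--     prev_empty_line = False
--     boards = []
--     current_board = []
--     for line in lines:
--         if line == '':
--             prev_empty_line = True
--             if len(current_board) > 0:
--                 boards.append(current_board)
--                 current_board = []
--         else:
--             prev_empty_line = False
--             current_board.append([int(num) for num in line.split()])
--     if len(current_board) > 0:
--         boards.append(current_board)
--         current_board = []
--     return boards
-- ===== SOURCE B (Python) =====
-- def create_boards(lines: list) -> list:
--     # Segment lines into maximal runs of non-blank lines, then parse each run.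
--     boards = []
--     i, n = 0, len(lines)
--     while i < n:
--         if lines[i] == '':
--             i += 1
--         else:
--             j = i
--             while j < n and lines[j] != '':
--                 j += 1
--             boards.append([[int(x) for x in l.split()] for l in lines[i:j]])
--             i = j
--     return boards
-- ===== Notes on version B (the rewrite author's own statement) =====
-- stated objective: alternative
-- what changed: Replaces A's stateful row accumulator (current_board with a post-loop flush and a dead prev_empty_line flag) by a two-level run segmentation: scan to the end of each maximal non-blank run, slice it out and parse it in one step.
import Mathlib
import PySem

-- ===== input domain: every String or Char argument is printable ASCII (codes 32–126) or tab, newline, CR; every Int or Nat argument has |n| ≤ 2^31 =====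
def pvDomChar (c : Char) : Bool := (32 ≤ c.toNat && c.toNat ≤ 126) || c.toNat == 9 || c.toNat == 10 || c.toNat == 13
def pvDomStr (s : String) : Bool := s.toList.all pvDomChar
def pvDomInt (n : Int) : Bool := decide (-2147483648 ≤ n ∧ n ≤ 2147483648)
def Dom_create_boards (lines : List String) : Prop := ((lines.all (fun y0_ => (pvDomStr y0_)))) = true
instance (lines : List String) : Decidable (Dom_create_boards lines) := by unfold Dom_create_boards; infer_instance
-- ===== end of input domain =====

-- B replaces A's stateful row accumulator (with post-loop flush and dead prev_empty_line flag)
-- by segmenting the lines into maximal non-blank runs and parsing each run; same cost (objective: alternative).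


-- [int(num) for num in line.split()]; Pre_ guarantees every ofStr? succeeds, so getD 0 is never taken
def pvParseLine (l : String) : List Int :=
  (PySem.Str.split₀ l).map (fun t => (PySem.Int.ofStr? t).getD 0)

-- ===== PORT A =====
-- A's loop: state (prev_empty_line, boards, current_board); the trailing flush is the [] case
def pvAGo : List String → Bool → List (List (List Int)) → List (List Int) → List (List (List Int))
  | [], _, boards, cur => if cur.length > 0 then boards ++ [cur] else boards
  | l :: ls, _, boards, cur =>
      if l = "" then
        pvAGo ls true (if cur.length > 0 then boards ++ [cur] else boards)
          (if cur.length > 0 then [] else cur)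
      else
        pvAGo ls false boards (cur ++ [pvParseLine l])

def create_boards (lines : List String) : List (List (List Int)) :=
  pvAGo lines false [] []

-- ===== PORT B =====
-- B: skip blank lines; otherwise scan to the end of the non-blank run, parse that slice, continue after it
def pvBGo : List String → List (List (List Int))
  | [] => []
  | l :: ls =>
      if l = "" then pvBGo ls
      else ((l :: ls).takeWhile (fun x => x ≠ "")).map pvParseLine
             :: pvBGo ((l :: ls).dropWhile (fun x => x ≠ ""))
  termination_by lines => lines.length
  decreasing_by
    · simp
    · simp only [List.dropWhile_cons]
      rw [if_pos (by simp [*])]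
      exact Nat.lt_succ_of_le (List.length_dropWhile_le _ _)

def create_boards_alt (lines : List String) : List (List (List Int)) :=
  pvBGo lines

-- ===== PRECONDITION & SPEC =====
-- Pre_ excludes lines containing a whitespace-separated token that int() rejects (Python raises ValueError there)
def Pre_create_boards (lines : List String) : Prop :=
  ∀ l ∈ lines, ∀ t ∈ PySem.Str.split₀ l, (PySem.Int.ofStr? t).isSome = true
instance (lines : List String) : Decidable (Pre_create_boards lines) := by
  unfold Pre_create_boards; infer_instance

def pvWitness_create_boards : List String := ["22 13 17", "8 2 23", "", "3 15 0", ""]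

def Spec_create_boards (lines : List String) (out : List (List (List Int))) : Prop :=
  out = create_boards_alt lines
instance (lines : List String) (out : List (List (List Int))) : Decidable (Spec_create_boards lines out) := by
  unfold Spec_create_boards; infer_instance

-- ===== CLAIM (what is proved, stated in full; the proofs are below) =====
def Claim_equal_create_boards : Prop :=
  ∀ (lines : List String), Dom_create_boards lines → Pre_create_boards lines →
    Spec_create_boards lines (create_boards lines)

-- ===== LEMMAS AND PROOFS =====

theorem pvBGo_cons_blank (ls : List String) : pvBGo ("" :: ls) = pvBGo ls := by
  rw [pvBGo]
  simp

theorem pvBGo_cons (l : String) (ls : List String) (h : l ≠ "") :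
    pvBGo (l :: ls) =
      ((l :: ls).takeWhile (fun x => x ≠ "")).map pvParseLine
        :: pvBGo ((l :: ls).dropWhile (fun x => x ≠ "")) := by
  rw [pvBGo]
  simp [h]

-- A's accumulated boards are a prefix of the result
theorem pvAGo_boards (lines : List String) :
    ∀ (p : Bool) (boards : List (List (List Int))) (cur : List (List Int)),
      pvAGo lines p boards cur = boards ++ pvAGo lines p [] cur := by
  induction lines with
  | nil =>
    intro p boards cur
    by_cases h : cur.length > 0 <;> simp [pvAGo, h]
  | cons l ls ih =>
    intro p boards cur
    by_cases h : l = ""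
    · subst h
      simp only [pvAGo, if_pos]
      by_cases hc : cur.length > 0
      · simp only [hc, if_true, List.nil_append]
        rw [ih true (boards ++ [cur]) [], ih true [cur] []]
        simp
      · simp only [hc, if_false]
        exact ih true boards cur
    · simp only [pvAGo, if_neg h]
      exact ih false boards (cur ++ [pvParseLine l])

-- Main invariant: with empty accumulator A's loop produces B's runs; with a nonempty
-- accumulator it extends it with the leading run and proceeds like B.
theorem pvAGo_eq_pvBGo (lines : List String) :
    (pvAGo lines false [] [] = pvBGo lines ∧ pvAGo lines true [] [] = pvBGo lines) ∧
    (∀ cur : List (List Int), cur ≠ [] → ∀ p : Bool,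
      pvAGo lines p [] cur =
        (cur ++ (lines.takeWhile (fun x => x ≠ "")).map pvParseLine)
          :: pvBGo (lines.dropWhile (fun x => x ≠ ""))) := by
  induction lines with
  | nil =>
    refine ⟨⟨by simp [pvAGo, pvBGo], by simp [pvAGo, pvBGo]⟩, ?_⟩
    intro cur hc p
    simp [pvAGo, List.length_pos_iff.mpr hc, pvBGo]
  | cons l ls ih =>
    obtain ⟨⟨ihf, iht⟩, ihcur⟩ := ih
    by_cases h : l = ""
    · subst h
      refine ⟨⟨?_, ?_⟩, ?_⟩
      · rw [pvBGo_cons_blank]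
        simpa [pvAGo] using iht
      · rw [pvBGo_cons_blank]
        simpa [pvAGo] using iht
      · intro cur hc p
        simp only [pvAGo, if_pos, List.length_pos_iff.mpr hc]
        rw [pvAGo_boards, iht, List.takeWhile_cons, List.dropWhile_cons]
        simp [pvBGo_cons_blank]
    · have step : ∀ (p : Bool) (cur : List (List Int)),
          pvAGo (l :: ls) p [] cur =
            ((cur ++ [pvParseLine l]) ++ (ls.takeWhile (fun x => x ≠ "")).map pvParseLine)
              :: pvBGo (ls.dropWhile (fun x => x ≠ "")) := by
        intro p cur
        simp only [pvAGo, if_neg h]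
        rw [ihcur (cur ++ [pvParseLine l]) (by simp) false]
      refine ⟨⟨?_, ?_⟩, ?_⟩
      · rw [step false [], pvBGo_cons l ls h, List.takeWhile_cons, List.dropWhile_cons]
        simp [h]
      · rw [step true [], pvBGo_cons l ls h, List.takeWhile_cons, List.dropWhile_cons]
        simp [h]
      · intro cur hc p
        rw [step p cur, List.takeWhile_cons, List.dropWhile_cons]
        simp [h]

-- ===== VERDICT (by name: the statement is the Claim_ definition above) =====
theorem create_boards_spec : Claim_equal_create_boards := by
  intro lines _ _
  unfold Spec_create_boards create_boards create_boards_alt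
  exact (pvAGo_eq_pvBGo lines).1.1
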